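-- pv_equiv track=rewrite | github.com/voc0der/LFRaider | tools/fetch_wcl_scores.py | parse_zone_ids
-- ===== SOURCE A (Python) =====
-- def parse_zone_ids(value: str | None) -> list[int]:
--     if value is None:
--         return []
--
--     zone_ids: list[int] = []
--     seen: set[int] = set()
--     for raw_part in value.split(","):
--         part = raw_part.strip()
--         if not part:
--             continue
--
--         try:
--             zone_id = int(part)
--         except ValueError as exc:
--             raise ValueError(f"invalid zone ID {part!r}") from exc
--         if zone_id <= 0:
--             raise ValueError("zone IDs must be positive integers")
--         if zone_id in seen:
--             continue
--
--         seen.add(zone_id)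
--         zone_ids.append(zone_id)
--
--     return zone_ids
-- ===== SOURCE B (Python) =====
-- def parse_zone_ids(value):
--     if value is None:
--         return []
--
--     ids: list[int] = []
--     rest = value
--     while True:
--         head, sep, remainder = rest.partition(",")
--         part = head.strip()
--         if part:
--             try:
--                 zone_id = int(part)
--             except ValueError as exc:
--                 raise ValueError(f"invalid zone ID {part!r}") from exc
--             if zone_id <= 0:
--                 raise ValueError("zone IDs must be positive integers")
--             ids.append(zone_id)
--         if not sep:
--             break
--         rest = remainder
--     return list(dict.fromkeys(ids))
-- ===== Notes on version B (the rewrite author's own statement) =====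
-- stated objective: alternative
-- what changed: B never builds the parts list or a seen-set: it consumes the string incrementally with str.partition(','), validating and collecting each segment's id in a while-loop, and deduplicates in a separate terminal pass via list(dict.fromkeys(ids)).
import Mathlib
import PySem

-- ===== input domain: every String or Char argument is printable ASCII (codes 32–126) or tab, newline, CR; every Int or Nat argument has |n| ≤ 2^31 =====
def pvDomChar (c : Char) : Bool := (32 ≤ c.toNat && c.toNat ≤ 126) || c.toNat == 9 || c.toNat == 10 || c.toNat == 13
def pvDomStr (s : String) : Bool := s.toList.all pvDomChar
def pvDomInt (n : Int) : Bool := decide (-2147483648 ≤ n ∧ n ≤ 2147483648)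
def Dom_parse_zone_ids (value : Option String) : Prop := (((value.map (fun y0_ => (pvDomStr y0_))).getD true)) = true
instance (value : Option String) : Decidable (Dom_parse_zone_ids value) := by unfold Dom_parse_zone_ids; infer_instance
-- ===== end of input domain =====

-- B consumes the string incrementally with str.partition (no split, no seen-set), then
-- deduplicates in one terminal pass (dict.fromkeys); objective: alternative, same cost.
-- Equivalence proved on Pre_ (inputs where Python A returns without raising).


-- ===== PORT A =====
-- loop body of A, named for the proofs; state = (zone_ids, seen)
def pvStepA (acc : List Int × PySem.Set Int) (raw_part : List Char) : List Int × PySem.Set Int :=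
  let part := PySem.Chars.strip raw_part
  if part = [] then acc
  else
    match PySem.Int.ofChars? part with
    | none => acc          -- Python raises ValueError here; excluded by Pre_
    | some zone_id =>
      if zone_id ≤ 0 then acc   -- Python raises ValueError here; excluded by Pre_
      else if PySem.Set.contains acc.2 zone_id then acc
      else (acc.1 ++ [zone_id], PySem.Set.add acc.2 zone_id)

def parse_zone_ids (value : Option String) : List Int :=
  match value with
  | none => []
  | some v =>
    ((PySem.Chars.splitOn v.toList [',']).foldl pvStepA ([], PySem.Set.empty)).1

-- ===== PORT B =====
-- B's while-loop: rest.partition(",") peels one segment per iteration; head =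
-- takeWhile (≠ ','), sep nonempty iff dropWhile (≠ ',') is, remainder its tail.
def pvGoB (s : List Char) : List Int :=
  let head := s.takeWhile (fun a => a ≠ ',')
  let tail := s.dropWhile (fun a => a ≠ ',')
  let part := PySem.Chars.strip head
  let ids : List Int :=
    if part = [] then []
    else
      match PySem.Int.ofChars? part with
      | none => []           -- Python raises ValueError here; excluded by Pre_
      | some zone_id =>
        if zone_id ≤ 0 then [] -- Python raises ValueError here; excluded by Pre_
        else [zone_id]
  match h : tail with
  | [] => ids                 -- no separator: loop breaks
  | _ :: remainder => ids ++ pvGoB remainder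
termination_by s.length
decreasing_by
  have hle := List.length_dropWhile_le (fun a : Char => decide (a ≠ ',')) s
  simp only [tail] at h
  rw [h] at hle
  simp at hle ⊢
  omega

def parse_zone_ids_alt (value : Option String) : List Int :=
  match value with
  | none => []
  | some v => PySem.List.dedup (pvGoB v.toList)

-- ===== PRECONDITION & SPEC =====
-- Pre_ excludes exactly the inputs where Python A raises ValueError: a nonempty stripped
-- part that is not a valid int literal, or one parsing to a non-positive integer.
def Pre_parse_zone_ids (value : Option String) : Prop :=
  ∀ raw ∈ PySem.Chars.splitOn ((value.getD "").toList) [','],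
    PySem.Chars.strip raw = [] ∨ 0 < (PySem.Int.ofChars? (PySem.Chars.strip raw)).getD 0
instance (value : Option String) : Decidable (Pre_parse_zone_ids value) := by
  unfold Pre_parse_zone_ids; infer_instance

def pvWitness_parse_zone_ids : Option String := some "3, 5,3"

def Spec_parse_zone_ids (value : Option String) (out : List Int) : Prop := out = parse_zone_ids_alt value
instance (value : Option String) (out : List Int) : Decidable (Spec_parse_zone_ids value out) := by unfold Spec_parse_zone_ids; infer_instance

-- ===== CLAIM (what is proved, stated in full; the proofs are below) =====
def Claim_equal_parse_zone_ids : Prop := ∀ (value : Option String), Dom_parse_zone_ids value → Pre_parse_zone_ids value → Spec_parse_zone_ids value (parse_zone_ids value)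

-- ===== LEMMAS AND PROOFS =====
-- a part's accepted value: none = skipped (empty) or invalid/non-positive (raising, outside Pre_)
def pvParse (raw : List Char) : Option Int :=
  if PySem.Chars.strip raw = [] then none
  else
    match PySem.Int.ofChars? (PySem.Chars.strip raw) with
    | none => none
    | some n => if n ≤ 0 then none else some n

def pvG (s : PySem.Set Int) (raw : List Char) : PySem.Set Int :=
  match pvParse raw with
  | none => s
  | some n => PySem.Set.add s n

lemma pvStepA_diag (l : List Int) (raw : List Char) :
    pvStepA (l, l) raw = (pvG l raw, pvG l raw) := by
  unfold pvStepA pvG pvParse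
  by_cases hp : PySem.Chars.strip raw = []
  · simp [hp]
  · simp only [hp, if_false]
    cases h : PySem.Int.ofChars? (PySem.Chars.strip raw) with
    | none => simp
    | some n =>
      by_cases hn : n ≤ 0
      · simp [hn]
      · by_cases hm : n ∈ l <;>
          simp [hn, PySem.Set.add, PySem.Set.contains, hm]

lemma foldl_stepA_diag (parts : List (List Char)) :
    ∀ l : List Int, parts.foldl pvStepA (l, l) = (parts.foldl pvG l, parts.foldl pvG l) := by
  induction parts with
  | nil => intro l; rfl
  | cons raw rest ih => intro l; simp only [List.foldl_cons, pvStepA_diag, ih]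

lemma foldl_pvG_eq (parts : List (List Char)) :
    ∀ s : PySem.Set Int, parts.foldl pvG s = (parts.filterMap pvParse).foldl PySem.Set.add s := by
  induction parts with
  | nil => intro s; rfl
  | cons raw rest ih =>
    intro s
    simp only [List.foldl_cons, List.filterMap_cons, pvG]
    cases h : pvParse raw <;> simp [ih]

-- first-comma split, structural on the string; equals splitOn · [','] (splitOn_single)
def pvSplit1 (c : Char) (pre : List Char) : List Char → List (List Char)
  | [] => [pre]
  | a :: rest => if a = c then pre :: pvSplit1 c [] rest else pvSplit1 c (pre ++ [a]) rest

lemma go_single (c : Char) : ∀ (fuel : Nat) (l cur : List Char) (acc : List (List Char)), l.length < fuel →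
    PySem.Chars.splitOn.go [c] fuel l cur acc = acc.reverse ++ pvSplit1 c cur.reverse l := by
  intro fuel
  induction fuel with
  | zero => intro l cur acc h; omega
  | succ n ih =>
    intro l cur acc h
    cases l with
    | nil => rw [PySem.Chars.splitOn.go.eq_def]; simp [pvSplit1]
    | cons a rest =>
      rw [PySem.Chars.splitOn.go.eq_def]
      by_cases hc : a = c
      · have hp : List.isPrefixOf [c] (a :: rest) = true := by simp [List.isPrefixOf, hc]
        simp only [hp, if_true, List.length_cons, List.length_nil, List.drop_succ_cons, List.drop_zero]
        rw [ih rest [] (cur.reverse :: acc) (Nat.lt_of_succ_lt_succ h)]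
        simp [pvSplit1, hc]
      · have hp : List.isPrefixOf [c] (a :: rest) = false := by
          simp [List.isPrefixOf]; exact fun hq => (hc hq.symm).elim
        simp only [hp, Bool.false_eq_true, if_false]
        rw [ih rest (a :: cur) acc (Nat.lt_of_succ_lt_succ h)]
        simp [pvSplit1, hc]

lemma splitOn_single (c : Char) (s : List Char) :
    PySem.Chars.splitOn s [c] = pvSplit1 c [] s := by
  unfold PySem.Chars.splitOn
  rw [go_single c (s.length + 1) s [] [] (by omega)]
  simp

lemma pvSplit1_shape (c : Char) (s : List Char) :
    pvSplit1 c [] s = s.takeWhile (fun a => a ≠ c) ::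
      (match s.dropWhile (fun a => a ≠ c) with
       | [] => []
       | _ :: rest => pvSplit1 c [] rest) := by
  suffices h : ∀ pre : List Char, pvSplit1 c pre s = (pre ++ s.takeWhile (fun a => a ≠ c)) ::
      (match s.dropWhile (fun a => a ≠ c) with
       | [] => []
       | _ :: rest => pvSplit1 c [] rest) by simpa using h []
  induction s with
  | nil => intro pre; simp [pvSplit1]
  | cons a rest ih =>
    intro pre
    by_cases hc : a = c
    · simp [pvSplit1, hc]
    · simp only [pvSplit1, hc, if_false, ih, List.takeWhile_cons, List.dropWhile_cons]
      simp [hc]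

lemma pvIds_toList (head : List Char) :
    (if PySem.Chars.strip head = [] then ([] : List Int)
     else match PySem.Int.ofChars? (PySem.Chars.strip head) with
          | none => []
          | some zone_id => if zone_id ≤ 0 then [] else [zone_id]) = (pvParse head).toList := by
  unfold pvParse
  by_cases hp : PySem.Chars.strip head = []
  · simp [hp]
  · simp only [hp, if_false]
    cases PySem.Int.ofChars? (PySem.Chars.strip head) with
    | none => simp
    | some n => by_cases hn : n ≤ 0 <;> simp [hn]

lemma filterMap_cons_toList (x : List Char) (t : List (List Char)) :
    (x :: t).filterMap pvParse = (pvParse x).toList ++ t.filterMap pvParse := by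
  cases h : pvParse x <;> simp [h]

lemma pvGoB_eq (s : List Char) :
    pvGoB s = (pvSplit1 ',' [] s).filterMap pvParse := by
  induction s using pvGoB.induct with
  | case1 s tl h =>
    have h' : List.dropWhile (fun a => decide (a ≠ ',')) s = [] := h
    rw [pvGoB.eq_def]
    rw [pvSplit1_shape ',' s, h', filterMap_cons_toList]
    simp [pvIds_toList]
  | case2 s tl x remainder h ih =>
    have h' : List.dropWhile (fun a => decide (a ≠ ',')) s = x :: remainder := h
    rw [pvGoB.eq_def]
    rw [pvSplit1_shape ',' s, h', filterMap_cons_toList]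
    simp [pvIds_toList, ih]

-- ===== VERDICT (by name: the statement is the Claim_ definition above) =====
theorem parse_zone_ids_spec : Claim_equal_parse_zone_ids := by
  intro value _ _
  unfold Spec_parse_zone_ids parse_zone_ids parse_zone_ids_alt
  cases value with
  | none => rfl
  | some v =>
    dsimp only
    rw [show (([], PySem.Set.empty) : List Int × PySem.Set Int)
          = (([] : List Int), ([] : List Int)) from rfl,
      foldl_stepA_diag, foldl_pvG_eq, pvGoB_eq,
      PySem.List.dedup_eq_ofList, PySem.Set.ofList_eq_foldl, splitOn_single]
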